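-- pv_equiv track=rewrite | github.com/EricccD567/Tuesday | backend/helpers/task_helpers.py | deadline_sort
-- ===== SOURCE A (Python) =====
-- def deadline_sort(tasks):
--     empty = []
--     allocated = []
--     for task in tasks:
--         if task['deadline'] == '':
--             empty.append(task)
--         else:
--             allocated.append(task)
--
--     sorted_tasks = sorted(allocated, key=lambda x: x['deadline']) + empty
--     return sorted_tasks
-- ===== SOURCE B (Python) =====
-- def deadline_sort(tasks):
--     return sorted(tasks, key=lambda x: (x['deadline'] == '', x['deadline']))
-- ===== Notes on version B (the rewrite author's own statement) =====
-- stated objective: idiomatic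
-- what changed: Replaces the explicit partition loop plus concatenation of two lists with one stable sort of the whole list under the composite key (deadline=='', deadline), relying on sort stability to keep empty-deadline tasks in original order at the end.
import Mathlib
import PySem

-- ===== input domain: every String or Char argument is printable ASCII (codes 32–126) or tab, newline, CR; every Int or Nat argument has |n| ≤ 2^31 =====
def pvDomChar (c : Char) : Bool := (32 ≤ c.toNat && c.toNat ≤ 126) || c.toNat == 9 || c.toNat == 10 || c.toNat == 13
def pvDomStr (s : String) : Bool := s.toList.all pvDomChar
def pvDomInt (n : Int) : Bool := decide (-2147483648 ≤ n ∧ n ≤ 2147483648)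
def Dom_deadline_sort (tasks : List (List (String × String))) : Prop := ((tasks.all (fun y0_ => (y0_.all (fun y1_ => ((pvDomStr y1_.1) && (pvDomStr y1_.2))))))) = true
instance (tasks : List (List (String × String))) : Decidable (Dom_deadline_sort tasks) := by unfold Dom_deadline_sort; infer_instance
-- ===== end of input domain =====

-- B replaces A's partition-loop-plus-concatenation by one stable sort of all tasks under the
-- composite key (deadline == '', deadline); same cost, more idiomatic.


-- ===== PORT A =====
-- task['deadline']: first-match lookup; exact whenever the task contains the key (Pre_)
def pvDl (task : List (String × String)) : String :=
  PySem.Dict.getD (PySem.Dict.mk task) "deadline" ""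

def deadline_sort (tasks : List (List (String × String))) : List (List (String × String)) :=
  let p := tasks.foldl
    (fun (acc : List (List (String × String)) × List (List (String × String))) task =>
      if pvDl task == "" then (acc.1 ++ [task], acc.2) else (acc.1, acc.2 ++ [task]))
    ([], [])
  PySem.List.sorted p.2 (fun x => pvDl x) ++ p.1

-- ===== PORT B =====
def deadline_sort_alt (tasks : List (List (String × String))) : List (List (String × String)) :=
  PySem.List.sorted2 tasks (fun x => pvDl x == "") (fun x => pvDl x)

-- ===== PRECONDITION & SPEC =====
-- Pre_ excludes exactly the inputs where the Python raises KeyError: a task without a 'deadline' key.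
def Pre_deadline_sort (tasks : List (List (String × String))) : Prop :=
  ∀ task ∈ tasks, PySem.Dict.contains (PySem.Dict.mk task) "deadline" = true
instance (tasks : List (List (String × String))) : Decidable (Pre_deadline_sort tasks) := by unfold Pre_deadline_sort; infer_instance

def pvWitness_deadline_sort : (List (List (String × String))) :=
  [[("deadline", "2022-03-01")], [("deadline", "")], [("deadline", "2021-01-01")]]

def Spec_deadline_sort (tasks : List (List (String × String))) (out : List (List (String × String))) : Prop := out = deadline_sort_alt tasks
instance (tasks : List (List (String × String))) (out : List (List (String × String))) : Decidable (Spec_deadline_sort tasks out) := by unfold Spec_deadline_sort; infer_instance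

-- ===== CLAIM (what is proved, stated in full; the proofs are below) =====
def Claim_equal_deadline_sort : Prop := ∀ (tasks : List (List (String × String))), Dom_deadline_sort tasks → Pre_deadline_sort tasks → Spec_deadline_sort tasks (deadline_sort tasks)

-- ===== LEMMAS AND PROOFS =====

-- A's comparison (within the non-empty group) and B's composite comparison
def pvB1 (a b : List (String × String)) : Bool := decide (pvDl a < pvDl b)
def pvB2 (a b : List (String × String)) : Bool :=
  decide ((pvDl a == "") < (pvDl b == "")) ||
    (!decide ((pvDl b == "") < (pvDl a == "")) && decide (pvDl a < pvDl b))

-- inserting an empty-deadline task with pvB2 always appends at the end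
lemma pvB2_empty_false (t y : List (String × String)) (ht : pvDl t = "") :
    pvB2 t y = false := by
  by_cases hy : pvDl y = ""
  · simp [pvB2, ht, hy]
  · have hyb : (pvDl y == "") = false := by simp [hy]
    simp [pvB2, ht, hyb, Bool.lt_iff]

-- inserting a non-empty task into (sorted non-empties ++ empties) with pvB2
lemma pv_insert_nonempty (t : List (String × String)) (s e : List (List (String × String)))
    (ht : pvDl t ≠ "") (hs : ∀ y ∈ s, pvDl y ≠ "") (he : ∀ y ∈ e, pvDl y = "") :
    PySem.List.insertBy pvB2 t (s ++ e) = PySem.List.insertBy pvB1 t s ++ e := by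
  induction s with
  | nil =>
    cases e with
    | nil => rfl
    | cons y ys =>
      have hy : pvDl y = "" := he y (by simp)
      have : pvB2 t y = true := by
        simp [pvB2, hy, Bool.lt_iff]
        simp [ht]
      simp [PySem.List.insertBy, this]
  | cons y ys ih =>
    have hy : pvDl y ≠ "" := hs y (by simp)
    have h12 : pvB2 t y = pvB1 t y := by
      simp [pvB2, pvB1, Bool.lt_iff, ht, hy]
    simp only [List.cons_append, PySem.List.insertBy, h12]
    by_cases hb : pvB1 t y = true
    · simp [hb]
    · simp only [Bool.not_eq_true] at hb
      simp [hb, ih (fun z hz => hs z (by simp [hz]))]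

-- main invariant: B's insertion-sort fold over all tasks keeps the shape
-- (A-sorted non-empties) ++ (empties in original order)
lemma pv_fold_split (tasks : List (List (String × String))) :
    ∀ (s e : List (List (String × String))),
      (∀ y ∈ s, pvDl y ≠ "") → (∀ y ∈ e, pvDl y = "") →
      tasks.foldl (fun acc x => PySem.List.insertBy pvB2 x acc) (s ++ e) =
        (tasks.filter (fun t => !(pvDl t == ""))).foldl
          (fun acc x => PySem.List.insertBy pvB1 x acc) s
        ++ (e ++ tasks.filter (fun t => pvDl t == "")) := by
  induction tasks with
  | nil => intro s e _ _; simp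
  | cons t ts ih =>
    intro s e hs he
    by_cases ht : pvDl t = ""
    · have happ : PySem.List.insertBy pvB2 t (s ++ e) = (s ++ e) ++ [t] :=
        PySem.List.insertBy_of_forall_not_before _ _ _
          (fun y _ => pvB2_empty_false t y ht)
      have he' : ∀ y ∈ e ++ [t], pvDl y = "" := by
        intro y hy; rcases List.mem_append.1 hy with h | h
        · exact he y h
        · simp at h; subst h; exact ht
      simp only [List.foldl_cons, happ, List.append_assoc]
      rw [ih s (e ++ [t]) hs he']
      simp [ht]
    · have hins := pv_insert_nonempty t s e ht hs he
      have hs' : ∀ y ∈ PySem.List.insertBy pvB1 t s, pvDl y ≠ "" := by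
        intro y hy
        rcases (PySem.List.mem_insertBy pvB1 t y s).1 hy with h | h
        · subst h; exact ht
        · exact hs y h
      simp only [List.foldl_cons, hins]
      rw [ih (PySem.List.insertBy pvB1 t s) e hs' he]
      simp [ht]

-- A's partition loop is the two filters
lemma pv_partition (tasks : List (List (String × String))) :
    ∀ (e a : List (List (String × String))),
      tasks.foldl
        (fun (acc : List (List (String × String)) × List (List (String × String))) task =>
          if pvDl task == "" then (acc.1 ++ [task], acc.2) else (acc.1, acc.2 ++ [task]))
        (e, a) =
      (e ++ tasks.filter (fun t => pvDl t == ""),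
       a ++ tasks.filter (fun t => !(pvDl t == ""))) := by
  induction tasks with
  | nil => intro e a; simp
  | cons t ts ih =>
    intro e a
    by_cases ht : (pvDl t == "") = true
    · simp only [List.foldl_cons, List.filter_cons, ht, if_true]
      rw [ih]; simp
    · simp only [List.foldl_cons, List.filter_cons, ht, if_false, Bool.false_eq_true]
      rw [ih]; simp

-- ===== VERDICT (by name: the statement is the Claim_ definition above) =====
theorem deadline_sort_spec : Claim_equal_deadline_sort := by
  intro tasks _ _
  unfold Spec_deadline_sort deadline_sort deadline_sort_alt
  rw [pv_partition tasks [] []]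
  simp only [List.nil_append]
  rw [PySem.List.sorted_eq_foldl_insertBy]
  have h := pv_fold_split tasks [] [] (by simp) (by simp)
  simp only [List.nil_append] at h
  rw [show (PySem.List.sorted2 tasks (fun x => pvDl x == "") (fun x => pvDl x)) =
      tasks.foldl (fun acc x => PySem.List.insertBy pvB2 x acc) [] from rfl, h]
  rfl
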